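-- pv_equiv track=rewrite | github.com/awsdevs/codebert-repo-chunker | codebert-repo-chunker/src/chunkers/build/maven_chunker.py | _group_plugins
-- ===== SOURCE A (Python) =====
-- from typing import List, Dict, Any, Optional, Tuple, Set
-- from collections import defaultdict
--
-- def _group_plugins(plugins: List[Dict[str, Any]]) -> Dict[str, List[Dict]]:
--     """Group plugins by type/purpose"""
--     groups = defaultdict(list)
--
--     for plugin in plugins:
--         artifact_id = plugin.get('artifactId', '')
--
--         # Categorize based on plugin artifact ID
--         if 'compiler' in artifact_id or 'javac' in artifact_id:
--             groups['compilation'].append(plugin)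
--         elif 'test' in artifact_id or 'surefire' in artifact_id or 'failsafe' in artifact_id:
--             groups['testing'].append(plugin)
--         elif 'package' in artifact_id or 'jar' in artifact_id or 'war' in artifact_id:
--             groups['packaging'].append(plugin)
--         elif 'deploy' in artifact_id or 'release' in artifact_id:
--             groups['deployment'].append(plugin)
--         elif 'clean' in artifact_id:
--             groups['lifecycle'].append(plugin)
--         elif 'spring' in artifact_id:
--             groups['spring'].append(plugin)
--         else:
--             groups['other'].append(plugin)
--
--     return dict(groups)
-- ===== SOURCE B (Python) =====
-- _KEYWORD_GROUP = [
--     ('compiler', 'compilation'), ('javac', 'compilation'),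
--     ('test', 'testing'), ('surefire', 'testing'), ('failsafe', 'testing'),
--     ('package', 'packaging'), ('jar', 'packaging'), ('war', 'packaging'),
--     ('deploy', 'deployment'), ('release', 'deployment'),
--     ('clean', 'lifecycle'),
--     ('spring', 'spring'),
-- ]
--
-- def _classify(artifact_id):
--     """Group of the first keyword (in priority order) contained in artifact_id."""
--     return next((g for k, g in _KEYWORD_GROUP if k in artifact_id), 'other')
--
-- def _group_plugins(plugins):
--     """Group plugins by type/purpose: decorate each plugin with its group label,
--     then build the result per distinct label (first-appearance order)."""
--     labeled = [(_classify(p.get('artifactId', '')), p) for p in plugins]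
--     order = list(dict.fromkeys(label for label, _ in labeled))
--     return {g: [p for label, p in labeled if label == g] for g in order}
-- ===== Notes on version B (the rewrite author's own statement) =====
-- stated objective: alternative
-- what changed: Replaces A's single pass appending into a defaultdict inside an if/elif chain by a staged decorate-then-group pipeline: label each plugin via a flat priority keyword->group table, dedup labels with dict.fromkeys for the key order, and build each group's list by a per-label filter comprehension.
import Mathlib
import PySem

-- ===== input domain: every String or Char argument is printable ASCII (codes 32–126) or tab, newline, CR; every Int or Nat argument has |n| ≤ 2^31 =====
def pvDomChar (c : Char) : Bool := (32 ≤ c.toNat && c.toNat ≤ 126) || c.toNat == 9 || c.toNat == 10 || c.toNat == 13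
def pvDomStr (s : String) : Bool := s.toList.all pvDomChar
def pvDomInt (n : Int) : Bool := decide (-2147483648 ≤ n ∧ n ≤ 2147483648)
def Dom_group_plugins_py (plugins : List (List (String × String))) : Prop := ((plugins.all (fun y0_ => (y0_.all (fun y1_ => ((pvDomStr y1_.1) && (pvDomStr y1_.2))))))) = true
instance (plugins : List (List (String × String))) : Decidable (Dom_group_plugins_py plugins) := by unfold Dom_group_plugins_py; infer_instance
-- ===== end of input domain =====

-- B replaces A's single defaultdict-appending pass by a staged decorate / dedup-keys / per-label-filter pipeline; same results, different decomposition.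

-- ===== PORT A =====
-- literal port of the if/elif chain, appending into a defaultdict(list); returns dict(groups) as its items
def group_plugins_py (plugins : List (List (String × String))) : List (String × List (List (String × String))) :=
  (plugins.foldl (fun groups plugin =>
    let artifact_id := (PySem.Dict.mk plugin).getD "artifactId" ""
    if PySem.Str.isIn "compiler" artifact_id || PySem.Str.isIn "javac" artifact_id then
      groups.modify "compilation" [] (· ++ [plugin])
    else if PySem.Str.isIn "test" artifact_id || PySem.Str.isIn "surefire" artifact_id || PySem.Str.isIn "failsafe" artifact_id then
      groups.modify "testing" [] (· ++ [plugin])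
    else if PySem.Str.isIn "package" artifact_id || PySem.Str.isIn "jar" artifact_id || PySem.Str.isIn "war" artifact_id then
      groups.modify "packaging" [] (· ++ [plugin])
    else if PySem.Str.isIn "deploy" artifact_id || PySem.Str.isIn "release" artifact_id then
      groups.modify "deployment" [] (· ++ [plugin])
    else if PySem.Str.isIn "clean" artifact_id then
      groups.modify "lifecycle" [] (· ++ [plugin])
    else if PySem.Str.isIn "spring" artifact_id then
      groups.modify "spring" [] (· ++ [plugin])
    else
      groups.modify "other" [] (· ++ [plugin])) PySem.Dict.empty).items

-- ===== PORT B =====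
-- Source B's flat priority keyword -> group table
def pvKeywordGroup : List (String × String) :=
  [("compiler", "compilation"), ("javac", "compilation"),
   ("test", "testing"), ("surefire", "testing"), ("failsafe", "testing"),
   ("package", "packaging"), ("jar", "packaging"), ("war", "packaging"),
   ("deploy", "deployment"), ("release", "deployment"),
   ("clean", "lifecycle"),
   ("spring", "spring")]

-- next((g for k, g in _KEYWORD_GROUP if k in artifact_id), 'other')
def pvClassify (artifact_id : String) : String :=
  ((pvKeywordGroup.find? (fun kg => PySem.Str.isIn kg.1 artifact_id)).map Prod.snd).getD "other"

-- decorate, dedup the labels (dict.fromkeys = PySem.List.dedup), then one filter pass per label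
def group_plugins_py_alt (plugins : List (List (String × String))) : List (String × List (List (String × String))) :=
  let labeled := plugins.map (fun p => (pvClassify ((PySem.Dict.mk p).getD "artifactId" ""), p))
  let order := PySem.List.dedup (labeled.map Prod.fst)
  order.map (fun g => (g, (labeled.filter (fun lp => lp.1 == g)).map Prod.snd))

-- ===== PRECONDITION & SPEC =====
def Spec_group_plugins_py (plugins : List (List (String × String))) (out : List (String × List (List (String × String)))) : Prop := out = group_plugins_py_alt plugins
instance (plugins : List (List (String × String))) (out : List (String × List (List (String × String)))) : Decidable (Spec_group_plugins_py plugins out) := by unfold Spec_group_plugins_py; infer_instance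

-- ===== CLAIM (what is proved, stated in full; the proofs are below) =====
def Claim_equal_group_plugins_py : Prop := ∀ (plugins : List (List (String × String))), Dom_group_plugins_py plugins → Spec_group_plugins_py plugins (group_plugins_py plugins)

-- ===== LEMMAS AND PROOFS =====

-- B's flat first-keyword scan computes exactly A's if/elif chain
lemma pvClassify_spec (aid : String) : pvClassify aid =
    (if PySem.Str.isIn "compiler" aid || PySem.Str.isIn "javac" aid then "compilation"
     else if PySem.Str.isIn "test" aid || PySem.Str.isIn "surefire" aid || PySem.Str.isIn "failsafe" aid then "testing"
     else if PySem.Str.isIn "package" aid || PySem.Str.isIn "jar" aid || PySem.Str.isIn "war" aid then "packaging"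
     else if PySem.Str.isIn "deploy" aid || PySem.Str.isIn "release" aid then "deployment"
     else if PySem.Str.isIn "clean" aid then "lifecycle"
     else if PySem.Str.isIn "spring" aid then "spring"
     else "other") := by
  unfold pvClassify pvKeywordGroup
  simp only [List.find?]
  generalize PySem.Str.isIn "compiler" aid = b1
  generalize PySem.Str.isIn "javac" aid = b2
  generalize PySem.Str.isIn "test" aid = b3
  generalize PySem.Str.isIn "surefire" aid = b4
  generalize PySem.Str.isIn "failsafe" aid = b5
  generalize PySem.Str.isIn "package" aid = b6
  generalize PySem.Str.isIn "jar" aid = b7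
  generalize PySem.Str.isIn "war" aid = b8
  generalize PySem.Str.isIn "deploy" aid = b9
  generalize PySem.Str.isIn "release" aid = b10
  generalize PySem.Str.isIn "clean" aid = b11
  generalize PySem.Str.isIn "spring" aid = b12
  revert b1 b2 b3 b4 b5 b6 b7 b8 b9 b10 b11 b12
  decide

-- A's loop, rewritten with pvClassify, is a modify-append fold over the decorated list
lemma group_plugins_py_eq_fold (plugins : List (List (String × String))) :
    group_plugins_py plugins =
      ((plugins.map (fun p => (pvClassify ((PySem.Dict.mk p).getD "artifactId" ""), p))).foldl
        (fun d q => d.modify q.1 [] (· ++ [q.2])) PySem.Dict.empty).items := by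
  unfold group_plugins_py
  rw [List.foldl_map]
  congr 2
  funext groups plugin
  simp only [pvClassify_spec]
  split_ifs <;> rfl

-- ===== VERDICT (by name: the statement is the Claim_ definition above) =====
theorem group_plugins_py_spec : Claim_equal_group_plugins_py := by
  intro plugins _
  unfold Spec_group_plugins_py group_plugins_py_alt
  rw [group_plugins_py_eq_fold]
  set labeled := plugins.map (fun p => (pvClassify ((PySem.Dict.mk p).getD "artifactId" ""), p)) with hlab
  have hnd : (labeled.foldl (fun d q => d.modify q.1 [] (· ++ [q.2])) PySem.Dict.empty).keys.Nodup := by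
    exact PySem.Dict.nodup_keys_foldl_modify_key labeled Prod.fst [] (fun d q => (· ++ [q.2])) PySem.Dict.empty (by simp [PySem.Dict.keys_empty])
  have hkeys : (labeled.foldl (fun d q => d.modify q.1 [] (· ++ [q.2])) PySem.Dict.empty).keys
      = PySem.List.dedup (labeled.map Prod.fst) := by
    rw [PySem.Dict.keys_foldl_modify_key]
    simp [PySem.Set.update, PySem.Set.ofList_eq_foldl, PySem.List.dedup_eq_ofList, PySem.Dict.keys_empty]
  rw [PySem.Dict.items_eq_map_keys _ hnd []]
  rw [hkeys]
  apply List.map_congr_left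
  intro g _
  rw [PySem.Dict.getD_foldl_modify_append]
  simp [PySem.Dict.getD_empty]
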